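-- pv_equiv track=rewrite | github.com/DewangPatil30/LearningDSA | IB: Distinct Numbers in Window.py | dNums
-- ===== SOURCE A (Python) =====
-- def dNums(arr, k):
--
--         res = []
--         dq = []
--         s = {}
--
--         l, r = 0, 0
--         while r < len(arr):
--             dq.append(r)
--             s[arr[r]] = r
--
--             if l > dq[0]:
--                 ind = dq.pop(0)
--                 if arr[ind] in s and s[arr[ind]] == ind: s.pop(arr[ind])
--
--             if r+1 >= k:
--                 res.append(len(s.keys()))
--                 l += 1
--
--             r += 1
--         return res
-- ===== SOURCE B (Python) =====
-- def dNums(arr, k):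
--     res = []
--     freq = {}
--     for r in range(len(arr)):
--         freq[arr[r]] = freq.get(arr[r], 0) + 1
--         if r >= k:
--             x = arr[r - k]
--             if freq[x] == 1:
--                 del freq[x]
--             else:
--                 freq[x] = freq[x] - 1
--         if r >= k - 1:
--             res.append(len(freq))
--     return res
-- ===== Notes on version B (the rewrite author's own statement) =====
-- stated objective: faster
-- what changed: Replaced A's index-deque with list.pop(0) plus a last-occurrence dict by a single-pass sliding-window frequency counter (increment the entering element, decrement/delete the leaving one, append the dict size), removing the O(k) pop(0) shift.
-- outside the precondition, e.g. on dNums([1, 2], 0): A returns [1, 1], B returns [0, 0]; on dNums([1, 2], -1): A returns [1, 1], B raises KeyError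
import Mathlib
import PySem

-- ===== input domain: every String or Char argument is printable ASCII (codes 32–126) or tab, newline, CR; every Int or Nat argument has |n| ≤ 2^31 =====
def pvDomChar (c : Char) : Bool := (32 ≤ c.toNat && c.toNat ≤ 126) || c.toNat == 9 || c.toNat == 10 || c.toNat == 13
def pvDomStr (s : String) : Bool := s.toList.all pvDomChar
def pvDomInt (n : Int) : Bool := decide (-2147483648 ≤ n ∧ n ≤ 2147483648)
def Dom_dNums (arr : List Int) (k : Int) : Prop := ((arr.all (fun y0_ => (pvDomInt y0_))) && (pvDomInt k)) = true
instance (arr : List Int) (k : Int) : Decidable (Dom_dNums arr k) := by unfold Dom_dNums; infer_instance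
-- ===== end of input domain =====

-- B replaces A's index-deque (list.pop(0)) + last-occurrence dict by a one-pass
-- sliding-window frequency counter (objective: faster — no O(k) pop(0) shift per step).

-- ===== PORT A =====
-- literal port of A's while-loop; fuel = arr.length is exactly the number of iterations (r runs 0..len-1)
def dNumsLoopA (arr : List Int) (k : Int) :
    Nat → List Int → List Int → PySem.Dict Int Int → Int → Int → List Int
  | 0, res, _dq, _s, _l, _r => res
  | fuel + 1, res, dq, s, l, r =>
    let dq1 := dq ++ [r]                                         -- dq.append(r)
    let s1 := s.insert (PySem.List.pyGetD arr r 0) r             -- s[arr[r]] = r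
    let p :=
      if l > dq1.headD 0 then                                    -- if l > dq[0]:
        let ind := dq1.headD 0                                   --   ind = dq.pop(0)
        let xv := PySem.List.pyGetD arr ind 0
        (dq1.tail, if s1.get? xv = some ind then s1.erase xv else s1)  -- if arr[ind] in s and s[arr[ind]] == ind: s.pop(arr[ind])
      else (dq1, s1)
    let q :=
      if r + 1 ≥ k then (res ++ [(p.2.size : Int)], l + 1)       -- res.append(len(s.keys())); l += 1
      else (res, l)
    dNumsLoopA arr k fuel q.1 p.1 p.2 q.2 (r + 1)

def dNums (arr : List Int) (k : Int) : List Int :=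
  dNumsLoopA arr k arr.length [] [] PySem.Dict.empty 0 0

-- ===== PORT B =====
-- literal port of Source B: one pass, frequency dict of the current window
def dNumsStepB (arr : List Int) (k : Int)
    (st : List Int × PySem.Dict Int Int) (r : Int) : List Int × PySem.Dict Int Int :=
  let a := PySem.List.pyGetD arr r 0
  let freq1 := st.2.insert a (st.2.getD a 0 + 1)                 -- freq[arr[r]] = freq.get(arr[r], 0) + 1
  let freq2 :=
    if r ≥ k then                                                -- if r >= k:
      let x := PySem.List.pyGetD arr (r - k) 0
      if freq1.getD x 0 = 1 then freq1.erase x                   --   if freq[x] == 1: del freq[x]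
      else freq1.insert x (freq1.getD x 0 - 1)                   --   else: freq[x] = freq[x] - 1
    else freq1
  (if r ≥ k - 1 then st.1 ++ [(freq2.size : Int)] else st.1, freq2)  -- if r >= k-1: res.append(len(freq))

def dNums_alt (arr : List Int) (k : Int) : List Int :=
  ((PySem.List.pyRange 0 (arr.length : Int) 1).foldl (dNumsStepB arr k) ([], PySem.Dict.empty)).1

-- ===== PRECONDITION & SPEC =====
-- Pre_ excludes k ≤ 0 with a nonempty list: a sliding window of non-positive size is an
-- unspecifiable corner — A returns accidental leftover-state counts there while B returns
-- zero counts (k = 0) or raises KeyError/IndexError (k < 0).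
def Pre_dNums (arr : List Int) (k : Int) : Prop := arr = [] ∨ 1 ≤ k
instance (arr : List Int) (k : Int) : Decidable (Pre_dNums arr k) := by unfold Pre_dNums; infer_instance

def pvWitness_dNums : List Int × Int := ([1, 2, 1, 3], 2)

def Spec_dNums (arr : List Int) (k : Int) (out : List Int) : Prop := out = dNums_alt arr k
instance (arr : List Int) (k : Int) (out : List Int) : Decidable (Spec_dNums arr k out) := by unfold Spec_dNums; infer_instance

-- ===== CLAIM (what is proved, stated in full; the proofs are below) =====
def Claim_equal_dNums : Prop := ∀ (arr : List Int) (k : Int), Dom_dNums arr k → Pre_dNums arr k → Spec_dNums arr k (dNums arr k)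

-- ===== LEMMAS AND PROOFS =====

-- the window of arr covering indices [i, i+len)
def wseq (arr : List Int) (i len : Nat) : List Int :=
  (List.range' i len).map (fun t => arr.getD t 0)

-- number of distinct values of a list
def dcount (xs : List Int) : Int := ((PySem.Set.ofList xs).length : Int)

-- Nat index list viewed as Ints (A's dq)
def mapNatInt (l : List Nat) : List Int := l.map (fun i => (i : Int))

lemma mapNatInt_cons (a : Nat) (l : List Nat) :
    mapNatInt (a :: l) = (a : Int) :: mapNatInt l := rfl

lemma mapNatInt_singleton (a : Nat) : mapNatInt [a] = [(a : Int)] := rfl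

lemma mapNatInt_append (l1 l2 : List Nat) :
    mapNatInt (l1 ++ l2) = mapNatInt l1 ++ mapNatInt l2 := by
  simp [mapNatInt]

-- the output produced by the first m iterations of either loop (kn = k.toNat ≥ 1)
def outPre (arr : List Int) (kn m : Nat) : List Int :=
  (List.range (m + 1 - kn)).map (fun i => dcount (wseq arr i kn))

-- index of the last occurrence of v among indices < m
def lastIdx (arr : List Int) : Nat → Int → Option Nat
  | 0, _ => none
  | m + 1, v => if arr.getD m 0 = v then some m else lastIdx arr m v

-- invariant of A's dict s: keys are exactly the values whose last occurrence (< m) is ≥ lo,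
-- and the stored value is that last-occurrence index
def AInvb (arr : List Int) (lo m : Nat) (s : PySem.Dict Int Int) : Prop :=
  s.keys.Nodup ∧
  ∀ v j, s.get? v = some j ↔ ∃ jn : Nat, j = (jn : Int) ∧ lastIdx arr m v = some jn ∧ lo ≤ jn

-- invariant of B's dict freq: the multiset of counts of the window arr[lo:m], no zero entries
def BInvb (arr : List Int) (lo m : Nat) (f : PySem.Dict Int Int) : Prop :=
  f.keys.Nodup ∧
  (∀ v, v ∈ f.keys ↔ v ∈ wseq arr lo (m - lo)) ∧
  (∀ v, f.getD v 0 = ((wseq arr lo (m - lo)).count v : Int))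

lemma wseq_concat (arr : List Int) (i len : Nat) :
    wseq arr i (len + 1) = wseq arr i len ++ [arr.getD (i + len) 0] := by
  simp [wseq, List.range'_concat]

lemma wseq_cons (arr : List Int) (i len : Nat) :
    wseq arr i (len + 1) = arr.getD i 0 :: wseq arr (i + 1) len := by
  simp [wseq, List.range'_succ]

lemma lastIdx_succ (arr : List Int) (m : Nat) (v : Int) :
    lastIdx arr (m + 1) v = if arr.getD m 0 = v then some m else lastIdx arr m v := rfl

lemma lastIdx_spec (arr : List Int) (m : Nat) (v : Int) (j : Nat)
    (h : lastIdx arr m v = some j) : arr.getD j 0 = v ∧ j < m := by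
  induction m with
  | zero => simp [lastIdx] at h
  | succ m ih =>
    rw [lastIdx_succ] at h
    by_cases hc : arr.getD m 0 = v
    · rw [if_pos hc] at h
      injection h with h
      subst h
      exact ⟨hc, Nat.lt_succ_self m⟩
    · rw [if_neg hc] at h
      obtain ⟨h1, h2⟩ := ih h
      exact ⟨h1, Nat.lt_succ_of_lt h2⟩

lemma mem_wseq_iff_lastIdx (arr : List Int) (i m : Nat) (v : Int) :
    v ∈ wseq arr i (m - i) ↔ ∃ j, lastIdx arr m v = some j ∧ i ≤ j := by
  induction m with
  | zero => simp [wseq, lastIdx]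
  | succ m ih =>
    by_cases him : i ≤ m
    · have h1 : m + 1 - i = (m - i) + 1 := by omega
      rw [h1, wseq_concat]
      have hi : i + (m - i) = m := by omega
      rw [hi, lastIdx_succ]
      by_cases hc : arr.getD m 0 = v
      · rw [if_pos hc]
        simp only [List.mem_append, List.mem_singleton]
        constructor
        · intro _; exact ⟨m, rfl, him⟩
        · intro _; exact Or.inr hc.symm
      · rw [if_neg hc]
        simp only [List.mem_append, List.mem_singleton, ih]
        constructor
        · rintro (h | h)
          · exact h
          · exact absurd h.symm hc
        · intro h; exact Or.inl h
    · have h0 : m + 1 - i = 0 := by omega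
      rw [h0]
      simp only [wseq, List.range', List.map_nil, List.not_mem_nil, false_iff]
      rintro ⟨j, hj, hij⟩
      have := lastIdx_spec arr (m + 1) v j hj
      omega

-- dict facts about erase not in the prelude (Int keys)
lemma dict_get?_erase_self (d : PySem.Dict Int Int) (x : Int) :
    (d.erase x).get? x = none := by
  simp only [PySem.Dict.get?, PySem.Dict.erase, Option.map_eq_none_iff, List.find?_eq_none,
    List.mem_filter]
  intro p hp
  simp at hp
  simp [hp.2]

lemma find?_filter_ne_aux (t : List (Int × Int)) (x v : Int) (h : v ≠ x) :
    List.find? (fun p => p.1 == v) (t.filter (fun p => !p.1 == x))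
      = List.find? (fun p => p.1 == v) t := by
  induction t with
  | nil => rfl
  | cons p t ih =>
    by_cases hv : p.1 = v
    · have hpx : ¬ p.1 = x := by rw [hv]; exact h
      rw [List.filter_cons, if_pos (by simp [hpx]),
        List.find?_cons_of_pos (by simp [hv]), List.find?_cons_of_pos (by simp [hv])]
    · rw [List.filter_cons]
      by_cases hpx : p.1 = x
      · rw [if_neg (by simp [hpx]), ih, List.find?_cons_of_neg (by simp [hv])]
      · rw [if_pos (by simp [hpx]), List.find?_cons_of_neg (by simp [hv]),
          List.find?_cons_of_neg (by simp [hv]), ih]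

lemma dict_get?_erase_of_ne (d : PySem.Dict Int Int) (x v : Int) (h : v ≠ x) :
    (d.erase x).get? v = d.get? v := by
  simp only [PySem.Dict.get?, PySem.Dict.erase]
  rw [find?_filter_ne_aux d.items x v h]

lemma dict_mem_keys_erase (d : PySem.Dict Int Int) (x v : Int) :
    v ∈ (d.erase x).keys ↔ v ∈ d.keys ∧ v ≠ x := by
  simp only [PySem.Dict.keys, PySem.Dict.erase, List.mem_map, List.mem_filter]
  constructor
  · rintro ⟨p, ⟨hp, hne⟩, rfl⟩; simp at hne; exact ⟨⟨p, hp, rfl⟩, hne⟩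
  · rintro ⟨⟨p, hp, rfl⟩, hne⟩; exact ⟨p, ⟨hp, by simpa using hne⟩, rfl⟩

lemma dict_nodup_keys_erase (d : PySem.Dict Int Int) (x : Int) (h : d.keys.Nodup) :
    (d.erase x).keys.Nodup := by
  simp only [PySem.Dict.keys, PySem.Dict.erase] at *
  exact ((List.filter_sublist (l := d.items)).map (fun (p : Int × Int) => p.1)).nodup h

lemma dict_size_eq_keys_length (d : PySem.Dict Int Int) : d.size = d.keys.length := by
  simp [PySem.Dict.size, PySem.Dict.keys]

-- a dict whose keys are exactly (as a set) the values of w has size = dcount w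
lemma size_eq_dcount (d : PySem.Dict Int Int) (w : List Int)
    (hnd : d.keys.Nodup) (hmem : ∀ v, v ∈ d.keys ↔ v ∈ w) :
    (d.size : Int) = dcount w := by
  have hperm : d.keys.Perm (PySem.Set.ofList w) := by
    apply (List.perm_ext_iff_of_nodup hnd (PySem.Set.nodup_ofList w)).2
    intro a
    rw [hmem a, PySem.Set.mem_ofList]
  rw [dict_size_eq_keys_length, dcount, hperm.length_eq]

lemma outPre_succ_ge (arr : List Int) (kn m : Nat) (h : kn ≤ m + 1) :
    outPre arr kn (m + 1) = outPre arr kn m ++ [dcount (wseq arr (m + 1 - kn) kn)] := by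
  have : m + 1 + 1 - kn = (m + 1 - kn) + 1 := by omega
  rw [outPre, this, List.range_succ]
  simp [outPre]

lemma outPre_succ_lt (arr : List Int) (kn m : Nat) (h : m + 1 < kn) :
    outPre arr kn (m + 1) = outPre arr kn m := by
  have h1 : m + 1 + 1 - kn = 0 := by omega
  have h2 : m + 1 - kn = 0 := by omega
  rw [outPre, outPre, h1, h2]

-- invariant steps for A
lemma AInvb_insert (arr : List Int) (lo m : Nat) (s : PySem.Dict Int Int)
    (hlo : lo ≤ m) (h : AInvb arr lo m s) :
    AInvb arr lo (m + 1) (s.insert (arr.getD m 0) (m : Int)) := by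
  obtain ⟨hnd, hg⟩ := h
  refine ⟨PySem.Dict.nodup_keys_insert _ _ _ hnd, ?_⟩
  intro v j
  rw [PySem.Dict.get?_insert, lastIdx_succ]
  by_cases hv : v = arr.getD m 0
  · rw [if_pos hv, if_pos hv.symm]
    constructor
    · intro hj; injection hj with hj; exact ⟨m, hj.symm, rfl, hlo⟩
    · rintro ⟨jn, rfl, hj, _⟩; injection hj with hj; rw [hj]
  · rw [if_neg hv, if_neg (fun hh => hv hh.symm), hg v j]

lemma AInvb_advance_erase (arr : List Int) (lo m : Nat) (s : PySem.Dict Int Int)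
    (h : AInvb arr lo m s)
    (hs : s.get? (arr.getD lo 0) = some (lo : Int)) :
    AInvb arr (lo + 1) m (s.erase (arr.getD lo 0)) := by
  obtain ⟨hnd, hg⟩ := h
  refine ⟨dict_nodup_keys_erase _ _ hnd, ?_⟩
  intro v j
  by_cases hv : v = arr.getD lo 0
  · subst hv
    rw [dict_get?_erase_self]
    obtain ⟨jn, hjn, hlast, _⟩ := (hg _ _).1 hs
    have hjn' : jn = lo := by exact_mod_cast hjn.symm
    subst hjn'
    constructor
    · intro hh
      simp at hh
    · rintro ⟨jn', _, hl', hge⟩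
      rw [hlast] at hl'
      injection hl' with hl'
      omega
  · rw [dict_get?_erase_of_ne _ _ _ hv, hg v j]
    constructor
    · rintro ⟨jn, rfl, hl, hge⟩
      refine ⟨jn, rfl, hl, ?_⟩
      rcases Nat.lt_or_ge lo jn with hlt | hle
      · omega
      · have : jn = lo := by omega
        subst this
        have := lastIdx_spec arr m v jn hl
        exact absurd this.1.symm hv
    · rintro ⟨jn, rfl, hl, hge⟩; exact ⟨jn, rfl, hl, by omega⟩

lemma AInvb_advance_noerase (arr : List Int) (lo m : Nat) (s : PySem.Dict Int Int)
    (h : AInvb arr lo m s)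
    (hs : ¬ s.get? (arr.getD lo 0) = some (lo : Int)) :
    AInvb arr (lo + 1) m s := by
  obtain ⟨hnd, hg⟩ := h
  refine ⟨hnd, ?_⟩
  intro v j
  rw [hg v j]
  constructor
  · rintro ⟨jn, rfl, hl, hge⟩
    refine ⟨jn, rfl, hl, ?_⟩
    rcases Nat.lt_or_ge lo jn with hlt | hle
    · omega
    · have hjl : jn = lo := by omega
      subst hjl
      have hv := (lastIdx_spec arr m v jn hl).1
      subst hv
      exact absurd ((hg _ _).2 ⟨jn, rfl, hl, le_refl _⟩) hs
  · rintro ⟨jn, rfl, hl, hge⟩; exact ⟨jn, rfl, hl, by omega⟩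

lemma AInvb_keys_mem (arr : List Int) (lo m : Nat) (s : PySem.Dict Int Int)
    (h : AInvb arr lo m s) : ∀ v, v ∈ s.keys ↔ v ∈ wseq arr lo (m - lo) := by
  intro v
  rw [mem_wseq_iff_lastIdx]
  constructor
  · intro hv
    rcases hcase : s.get? v with _ | j
    · rw [PySem.Dict.get?_eq_none_iff_not_mem_keys] at hcase
      exact absurd hv hcase
    · obtain ⟨jn, _, hl, hge⟩ := (h.2 v j).1 hcase
      exact ⟨jn, hl, hge⟩
  · rintro ⟨j, hl, hge⟩
    have hsome : s.get? v = some (j : Int) := (h.2 v (j : Int)).2 ⟨j, rfl, hl, hge⟩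
    by_contra hnk
    rw [← PySem.Dict.get?_eq_none_iff_not_mem_keys] at hnk
    rw [hsome] at hnk
    simp at hnk

-- invariant steps for B
lemma dict_window_grow (f : PySem.Dict Int Int) (a : Int) (w : List Int)
    (hnd : f.keys.Nodup)
    (hmem : ∀ v, v ∈ f.keys ↔ v ∈ w)
    (hcnt : ∀ v, f.getD v 0 = (w.count v : Int)) :
    (f.insert a (f.getD a 0 + 1)).keys.Nodup ∧
    (∀ v, v ∈ (f.insert a (f.getD a 0 + 1)).keys ↔ v ∈ w ++ [a]) ∧
    (∀ v, (f.insert a (f.getD a 0 + 1)).getD v 0 = ((w ++ [a]).count v : Int)) := by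
  refine ⟨PySem.Dict.nodup_keys_insert _ _ _ hnd, ?_, ?_⟩
  · intro v
    rw [PySem.Dict.mem_keys_insert, hmem]
    simp [or_comm]
  · intro v
    rw [PySem.Dict.getD_insert, List.count_append]
    by_cases hv : v = a
    · subst hv
      rw [if_pos rfl, hcnt]
      have h1 : List.count v [v] = 1 := by simp
      rw [h1]
      push_cast
      ring
    · rw [if_neg hv, hcnt]
      have h0 : List.count v [a] = 0 := List.count_eq_zero.2 (by simp [hv])
      rw [h0]
      simp

lemma dict_window_shrink (f : PySem.Dict Int Int) (x : Int) (w : List Int)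
    (hnd : f.keys.Nodup)
    (hmem : ∀ v, v ∈ f.keys ↔ v ∈ x :: w)
    (hcnt : ∀ v, f.getD v 0 = ((x :: w).count v : Int)) :
    (if f.getD x 0 = 1 then f.erase x else f.insert x (f.getD x 0 - 1)).keys.Nodup ∧
    (∀ v, v ∈ (if f.getD x 0 = 1 then f.erase x else f.insert x (f.getD x 0 - 1)).keys ↔ v ∈ w) ∧
    (∀ v, (if f.getD x 0 = 1 then f.erase x else f.insert x (f.getD x 0 - 1)).getD v 0
        = (w.count v : Int)) := by
  have hcx : f.getD x 0 = (w.count x : Int) + 1 := by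
    rw [hcnt, List.count_cons]
    simp
  by_cases hone : f.getD x 0 = 1
  · have hzero : w.count x = 0 := by
      rw [hone] at hcx
      omega
    have hxnot : x ∉ w := List.count_eq_zero.1 hzero
    rw [if_pos hone]
    refine ⟨dict_nodup_keys_erase _ _ hnd, ?_, ?_⟩
    · intro v
      rw [dict_mem_keys_erase]
      by_cases hv : v = x
      · subst hv
        exact iff_of_false (by simp) hxnot
      · rw [hmem]
        simp only [List.mem_cons, ne_eq, hv, not_false_iff, and_true, false_or]
    · intro v
      by_cases hv : v = x
      · subst hv
        rw [PySem.Dict.getD_eq_get?_getD, dict_get?_erase_self, hzero]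
        rfl
      · rw [PySem.Dict.getD_eq_get?_getD, dict_get?_erase_of_ne _ _ _ hv,
          ← PySem.Dict.getD_eq_get?_getD, hcnt, List.count_cons]
        simp [show ¬ x = v from fun hh => hv hh.symm]
  · rw [if_neg hone]
    have hpos : 0 < w.count x := by
      have h2 : (w.count x : Int) + 1 ≠ 1 := by
        rw [← hcx]
        exact hone
      omega
    have hxin : x ∈ w := List.count_pos_iff.1 hpos
    refine ⟨PySem.Dict.nodup_keys_insert _ _ _ hnd, ?_, ?_⟩
    · intro v
      rw [PySem.Dict.mem_keys_insert]
      by_cases hv : v = x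
      · subst hv
        exact iff_of_true (Or.inl rfl) hxin
      · simp only [hv, false_or]
        rw [hmem]
        simp only [List.mem_cons, hv, false_or]
    · intro v
      rw [PySem.Dict.getD_insert]
      by_cases hv : v = x
      · subst hv
        rw [if_pos rfl, hcx]
        ring
      · rw [if_neg hv, hcnt, List.count_cons]
        simp [show ¬ x = v from fun hh => hv hh.symm]

lemma BInvb_insert (arr : List Int) (lo m : Nat) (f : PySem.Dict Int Int)
    (hlo : lo ≤ m) (h : BInvb arr lo m f) :
    BInvb arr lo (m + 1) (f.insert (arr.getD m 0) (f.getD (arr.getD m 0) 0 + 1)) := by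
  obtain ⟨hnd, hmem, hcnt⟩ := h
  have hw : wseq arr lo (m + 1 - lo) = wseq arr lo (m - lo) ++ [arr.getD m 0] := by
    have h1 : m + 1 - lo = (m - lo) + 1 := by omega
    have h2 : lo + (m - lo) = m := by omega
    rw [h1, wseq_concat, h2]
  obtain ⟨g1, g2, g3⟩ := dict_window_grow f (arr.getD m 0) (wseq arr lo (m - lo)) hnd hmem hcnt
  refine ⟨g1, ?_, ?_⟩
  · intro v
    rw [hw]
    exact g2 v
  · intro v
    rw [hw]
    exact g3 v

lemma BInvb_advance (arr : List Int) (lo m : Nat) (f : PySem.Dict Int Int)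
    (hlo : lo < m + 1) (h : BInvb arr lo (m + 1) f) :
    BInvb arr (lo + 1) (m + 1)
      (if f.getD (arr.getD lo 0) 0 = 1 then f.erase (arr.getD lo 0)
       else f.insert (arr.getD lo 0) (f.getD (arr.getD lo 0) 0 - 1)) := by
  obtain ⟨hnd, hmem, hcnt⟩ := h
  have hw : wseq arr lo (m + 1 - lo)
      = arr.getD lo 0 :: wseq arr (lo + 1) (m + 1 - (lo + 1)) := by
    have h1 : m + 1 - lo = (m + 1 - (lo + 1)) + 1 := by omega
    rw [h1, wseq_cons]
  simp only [hw] at hmem hcnt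
  exact dict_window_shrink f (arr.getD lo 0) (wseq arr (lo + 1) (m + 1 - (lo + 1))) hnd hmem hcnt

-- ===== A main loop lemma =====
lemma A_loop (arr : List Int) (k : Int) (hk : 1 ≤ k) :
    ∀ (fuel m : Nat) (s : PySem.Dict Int Int),
      fuel + m = arr.length →
      AInvb arr (m - k.toNat) m s →
      dNumsLoopA arr k fuel (outPre arr k.toNat m)
        (mapNatInt (List.range' (m - k.toNat) (min m k.toNat)))
        s (((m + 1 - k.toNat : Nat) : Int)) ((m : Nat) : Int)
      = outPre arr k.toNat arr.length := by
  intro fuel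
  induction fuel with
  | zero =>
    intro m s hfm _
    have hm : m = arr.length := by omega
    subst hm
    rfl
  | succ fuel ih =>
    intro m s hfm hinv
    have hkn : 1 ≤ k.toNat := by omega
    have ha : PySem.List.pyGetD arr ((m : Nat) : Int) 0 = arr.getD m 0 :=
      PySem.List.pyGetD_natCast arr m 0
    have hins : AInvb arr (m - k.toNat) (m + 1) (s.insert (arr.getD m 0) ((m : Nat) : Int)) :=
      AInvb_insert arr (m - k.toNat) m s (by omega) hinv
    have hr1 : ((m : Nat) : Int) + 1 = (((m + 1 : Nat)) : Int) := by push_cast; ring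
    rw [dNumsLoopA]
    simp only [ha]
    by_cases hmk : k.toNat ≤ m
    · -- pop branch taken
      have hsplit : mapNatInt (List.range' (m - k.toNat) (min m k.toNat))
          = ((m - k.toNat : Nat) : Int)
            :: mapNatInt (List.range' (m - k.toNat + 1) (k.toNat - 1)) := by
        have h1 : min m k.toNat = (k.toNat - 1) + 1 := by omega
        rw [h1, List.range'_succ, mapNatInt_cons]
      rw [hsplit, List.cons_append, List.headD_cons, List.tail_cons]
      rw [if_pos (show ((m + 1 - k.toNat : Nat) : Int) > ((m - k.toNat : Nat) : Int) by omega)]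
      have hx : PySem.List.pyGetD arr ((m - k.toNat : Nat) : Int) 0 = arr.getD (m - k.toNat) 0 :=
        PySem.List.pyGetD_natCast arr (m - k.toNat) 0
      rw [hx, hr1]
      have hdq' : mapNatInt (List.range' (m - k.toNat + 1) (k.toNat - 1)) ++ [((m : Nat) : Int)]
          = mapNatInt (List.range' (m + 1 - k.toNat) (min (m + 1) k.toNat)) := by
        have h2 : min (m + 1) k.toNat = (k.toNat - 1) + 1 := by omega
        have h4 : m - k.toNat + 1 = m + 1 - k.toNat := by omega
        have h3 : m + 1 - k.toNat + 1 * (k.toNat - 1) = m := by omega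
        rw [h2, List.range'_concat, h4, h3, mapNatInt_append, mapNatInt_singleton]
      have h4 : m - k.toNat + 1 = m + 1 - k.toNat := by omega
      have happ : (((m + 1 : Nat)) : Int) ≥ k := by omega
      have hl1 : ((m + 1 - k.toNat : Nat) : Int) + 1 = ((m + 1 + 1 - k.toNat : Nat) : Int) := by
        omega
      have hwl : (m + 1) - (m + 1 - k.toNat) = k.toNat := by omega
      by_cases hget : (s.insert (arr.getD m 0) ((m : Nat) : Int)).get? (arr.getD (m - k.toNat) 0)
          = some ((m - k.toNat : Nat) : Int)
      · rw [if_pos hget]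
        have hadv := AInvb_advance_erase arr (m - k.toNat) (m + 1) _ hins hget
        rw [h4] at hadv
        have hkm := AInvb_keys_mem arr (m + 1 - k.toNat) (m + 1) _ hadv
        rw [hwl] at hkm
        have hsz := size_eq_dcount _ _ hadv.1 hkm
        simp only [hdq', if_pos happ, hsz, ← outPre_succ_ge arr k.toNat m (by omega), hl1]
        exact ih (m + 1) _ (by omega) hadv
      · rw [if_neg hget]
        have hadv := AInvb_advance_noerase arr (m - k.toNat) (m + 1) _ hins hget
        rw [h4] at hadv
        have hkm := AInvb_keys_mem arr (m + 1 - k.toNat) (m + 1) _ hadv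
        rw [hwl] at hkm
        have hsz := size_eq_dcount _ _ hadv.1 hkm
        simp only [hdq', if_pos happ, hsz, ← outPre_succ_ge arr k.toNat m (by omega), hl1]
        exact ih (m + 1) _ (by omega) hadv
    · -- no pop
      have h0 : m - k.toNat = 0 := by omega
      have hmin : min m k.toNat = m := by omega
      rw [h0, hmin]
      have hhead : (mapNatInt (List.range' 0 m) ++ [((m : Nat) : Int)]).headD 0
          = ((0 : Nat) : Int) := by
        cases m with
        | zero => simp [mapNatInt]
        | succ j => rw [List.range'_succ, mapNatInt_cons, List.cons_append, List.headD_cons]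
      rw [hhead]
      rw [if_neg (show ¬ (((m + 1 - k.toNat : Nat) : Int) > ((0 : Nat) : Int)) by omega)]
      rw [hr1]
      have hdq' : mapNatInt (List.range' 0 m) ++ [((m : Nat) : Int)]
          = mapNatInt (List.range' (m + 1 - k.toNat) (min (m + 1) k.toNat)) := by
        have h2 : m + 1 - k.toNat = 0 := by omega
        have h3 : min (m + 1) k.toNat = m + 1 := by omega
        rw [h2, h3, List.range'_concat, mapNatInt_append, mapNatInt_singleton, one_mul,
          Nat.zero_add]
      have hinv' : AInvb arr (m + 1 - k.toNat) (m + 1)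
          (s.insert (arr.getD m 0) ((m : Nat) : Int)) := by
        have h2 : m + 1 - k.toNat = 0 := by omega
        rw [h2]
        rw [h0] at hins
        exact hins
      by_cases hc2 : k.toNat ≤ m + 1
      · have happ : (((m + 1 : Nat)) : Int) ≥ k := by omega
        have hkm := AInvb_keys_mem arr (m + 1 - k.toNat) (m + 1) _ hinv'
        have hwl : (m + 1) - (m + 1 - k.toNat) = k.toNat := by omega
        rw [hwl] at hkm
        have hsz := size_eq_dcount _ _ hinv'.1 hkm
        have hl1 : ((m + 1 - k.toNat : Nat) : Int) + 1 = ((m + 1 + 1 - k.toNat : Nat) : Int) := by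
          omega
        simp only [hdq', if_pos happ, hsz, ← outPre_succ_ge arr k.toNat m (by omega), hl1]
        exact ih (m + 1) _ (by omega) hinv'
      · have happ : ¬ ((((m + 1 : Nat)) : Int) ≥ k) := by omega
        have hl1 : ((m + 1 - k.toNat : Nat) : Int) = ((m + 1 + 1 - k.toNat : Nat) : Int) := by
          omega
        simp only [hdq', if_neg happ, ← outPre_succ_lt arr k.toNat m (by omega), hl1]
        exact ih (m + 1) _ (by omega) hinv'

-- ===== B main loop lemma =====
lemma B_loop (arr : List Int) (k : Int) (hk : 1 ≤ k) :
    ∀ (c m : Nat) (f : PySem.Dict Int Int),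
      m + c = arr.length →
      BInvb arr (m - k.toNat) m f →
      ((List.range' m c).foldl (fun st r => dNumsStepB arr k st ((r : Nat) : Int))
        (outPre arr k.toNat m, f)).1
      = outPre arr k.toNat arr.length := by
  intro c
  induction c with
  | zero =>
    intro m f hmc _
    have : m = arr.length := by omega
    subst this
    simp
  | succ c ih =>
    intro m f hmc hinv
    have hkn : 1 ≤ k.toNat := by omega
    have hk' : k = ((k.toNat : Nat) : Int) := (Int.toNat_of_nonneg (by omega)).symm
    rw [List.range'_succ, List.foldl_cons]
    obtain ⟨f2, hf2, hstep⟩ : ∃ f2, BInvb arr ((m + 1) - k.toNat) (m + 1) f2 ∧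
        dNumsStepB arr k (outPre arr k.toNat m, f) ((m : Nat) : Int)
          = (outPre arr k.toNat (m + 1), f2) := by
      have ha : PySem.List.pyGetD arr ((m : Nat) : Int) 0 = arr.getD m 0 :=
        PySem.List.pyGetD_natCast arr m 0
      have hf1 : BInvb arr (m - k.toNat) (m + 1)
          (f.insert (arr.getD m 0) (f.getD (arr.getD m 0) 0 + 1)) :=
        BInvb_insert arr (m - k.toNat) m f (by omega) hinv
      by_cases hmk : k.toNat ≤ m
      · -- removal branch taken
        have hge : ((m : Nat) : Int) ≥ k := by rw [hk']; exact_mod_cast hmk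
        have hxi : ((m : Nat) : Int) - k = ((m - k.toNat : Nat) : Int) := by
          omega
        have hx : PySem.List.pyGetD arr (((m : Nat) : Int) - k) 0 = arr.getD (m - k.toNat) 0 := by
          rw [hxi]; exact PySem.List.pyGetD_natCast arr (m - k.toNat) 0
        have hadv := BInvb_advance arr (m - k.toNat) m _ (by omega) hf1
        have hlo : m - k.toNat + 1 = m + 1 - k.toNat := by omega
        rw [hlo] at hadv
        refine ⟨_, hadv, ?_⟩
        unfold dNumsStepB
        simp only [ha, hx, if_pos hge]
        have hge1 : ((m : Nat) : Int) ≥ k - 1 := by omega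
        rw [if_pos hge1]
        have hsz := size_eq_dcount _ _ hadv.1 hadv.2.1
        have hwl : (m + 1) - (m + 1 - k.toNat) = k.toNat := by omega
        rw [hwl] at hsz
        rw [hsz, ← outPre_succ_ge arr k.toNat m (by omega)]
      · -- no removal
        have hlt : ¬ ((m : Nat) : Int) ≥ k := by omega
        have hlo : m - k.toNat = m + 1 - k.toNat := by omega
        rw [hlo] at hf1
        refine ⟨_, hf1, ?_⟩
        unfold dNumsStepB
        simp only [ha, if_neg hlt]
        by_cases hmk1 : k.toNat = m + 1
        · have hge1 : ((m : Nat) : Int) ≥ k - 1 := by omega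
          rw [if_pos hge1]
          have hsz := size_eq_dcount _ _ hf1.1 hf1.2.1
          have hwl : (m + 1) - (m + 1 - k.toNat) = k.toNat := by omega
          rw [hwl] at hsz
          rw [hsz, ← outPre_succ_ge arr k.toNat m (by omega)]
        · have hge1 : ¬ ((m : Nat) : Int) ≥ k - 1 := by omega
          rw [if_neg hge1]
          rw [← outPre_succ_lt arr k.toNat m (by omega)]
    rw [hstep]
    exact ih (m + 1) f2 (by omega) hf2

-- ===== VERDICT (by name: the statement is the Claim_ definition above) =====
theorem dNums_spec : Claim_equal_dNums := by
  intro arr k _hdom hpre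
  unfold Spec_dNums
  rcases hpre with hnil | hk
  · subst hnil
    simp [dNums, dNums_alt, dNumsLoopA, PySem.List.pyRange]
  · have hA : dNums arr k = outPre arr k.toNat arr.length := by
      have hinit : AInvb arr 0 0 PySem.Dict.empty := by
        constructor
        · simp [PySem.Dict.keys, PySem.Dict.empty]
        · intro v j
          simp [PySem.Dict.get?_empty, lastIdx]
      have hkn : (1 : Nat) ≤ k.toNat := by omega
      have := A_loop arr k hk arr.length 0 PySem.Dict.empty (by omega) (by simpa using hinit)
      rw [show (0 : Nat) - k.toNat = 0 from by omega, show min 0 k.toNat = 0 from by omega,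
        show (0 : Nat) + 1 - k.toNat = 0 from by omega] at this
      have hout0 : outPre arr k.toNat 0 = [] := by
        simp [outPre, Nat.sub_eq_zero_of_le hkn]
      rw [hout0] at this
      simpa [dNums, mapNatInt] using this
    have hB : dNums_alt arr k = outPre arr k.toNat arr.length := by
      have hinit : BInvb arr 0 0 PySem.Dict.empty := by
        refine ⟨by simp [PySem.Dict.keys, PySem.Dict.empty], ?_, ?_⟩
        · intro v; simp [PySem.Dict.keys, PySem.Dict.empty, wseq]
        · intro v; simp [PySem.Dict.getD_empty, wseq]
      have := B_loop arr k hk arr.length 0 PySem.Dict.empty (by omega) (by simpa using hinit)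
      have hkn : (1 : Nat) ≤ k.toNat := by omega
      have hout0 : outPre arr k.toNat 0 = [] := by
        simp [outPre, Nat.sub_eq_zero_of_le hkn]
      rw [hout0] at this
      rw [dNums_alt, PySem.List.pyRange_zero_natCast, List.range_eq_range', List.foldl_map]
      exact this
    rw [hA, hB]
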